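-- pv_equiv track=rewrite | github.com/DIMAthe47/common_utils_47 | tiling_utils.py | slice_rect2
-- ===== SOURCE A (Python) =====
-- from math import ceil
--
-- def slice_rect2(rect_size, tile_size, tile_step):
--     x_size, y_size = rect_size
--     x_step, y_step = tile_step
--
--     cols = ceil(x_size / x_step)
--     rows = ceil(y_size / y_step)
--     rects = [
--         (
--             (j - 1) * x_step + tile_size[0],
--             (i - 1) * y_step + tile_size[1],
--             tile_size[0],
--             tile_size[1]
--         )
--         for i in range(rows) for j in range(cols)
--     ]
--
--     if cols != x_size // x_step:
--         for i in range(rows):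
--             rect = list(rects[i * cols + cols - 1])
--             rect[2] = x_size - rect[0]
--             rects[i * cols + cols - 1] = tuple(rect)
--     if rows != y_size // y_step:
--         for j in range(cols):
--             rect = list(rects[(rows - 1) * cols + j])
--             rect[3] = y_size - rect[1]
--             rects[(rows - 1) * cols + j] = tuple(rect)
--
--     return rects
-- ===== SOURCE B (Python) =====
-- from math import ceil
--
-- def slice_rect2(rect_size, tile_size, tile_step):
--     x_size, y_size = rect_size
--     x_step, y_step = tile_step
--     cols = ceil(x_size / x_step)
--     rows = ceil(y_size / y_step)
--     clip_x = cols != x_size // x_step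
--     clip_y = rows != y_size // y_step
--     # column template: x-offset and width of each column, computed once
--     xs = []
--     for j in range(cols):
--         x0 = (j - 1) * x_step + tile_size[0]
--         w = x_size - x0 if (clip_x and j == cols - 1) else tile_size[0]
--         xs.append((x0, w))
--     rects = []
--     for i in range(rows):
--         y0 = (i - 1) * y_step + tile_size[1]
--         h = y_size - y0 if (clip_y and i == rows - 1) else tile_size[1]
--         rects += [(x0, y0, w, h) for (x0, w) in xs]
--     return rects
-- ===== Notes on version B (the rewrite author's own statement) =====
-- stated objective: simpler
-- what changed: B computes the two clip flags up front, builds the per-column (x-offset, width) template once, and emits each row directly from it in one construction pass, instead of A's build-everything-then-patch two extra correction passes with read-modify-write indexing.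
import Mathlib
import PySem

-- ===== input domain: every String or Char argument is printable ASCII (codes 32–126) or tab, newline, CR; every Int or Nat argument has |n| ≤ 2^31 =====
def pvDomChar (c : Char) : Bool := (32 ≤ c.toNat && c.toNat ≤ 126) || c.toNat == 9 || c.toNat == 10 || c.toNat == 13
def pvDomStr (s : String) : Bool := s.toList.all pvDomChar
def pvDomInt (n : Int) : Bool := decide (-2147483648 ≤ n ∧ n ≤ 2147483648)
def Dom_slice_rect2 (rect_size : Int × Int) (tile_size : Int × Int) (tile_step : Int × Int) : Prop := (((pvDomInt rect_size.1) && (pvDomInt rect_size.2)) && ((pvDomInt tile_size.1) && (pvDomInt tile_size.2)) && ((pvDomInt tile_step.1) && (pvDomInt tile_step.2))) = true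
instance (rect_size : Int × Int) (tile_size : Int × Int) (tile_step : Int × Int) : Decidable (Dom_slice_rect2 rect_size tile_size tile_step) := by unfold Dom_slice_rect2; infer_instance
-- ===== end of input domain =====

-- B folds A's two edge-clipping correction passes into the construction itself: clip flags first,
-- a per-column (x-offset, width) template built once, then one row pass (objective: simpler — no build-then-patch).

-- ===== PORT A =====
-- helper for A's read-modify-write `rect = list(rects[k]); rect[m] = v; rects[k] = tuple(rect)`:
-- Python indexing via pyGet? (none = IndexError, excluded by Pre_); the write is in range whenever the read is.
def pvModAt {α : Type} (rects : List α) (i : Int) (g : α → α) : List α :=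
  match PySem.List.pyGet? rects i with
  | some t => PySem.List.pySetD rects i (g t)
  | none => rects

-- literal port of A; `math.ceil(x_size / x_step)` is ported as the exact integer ceiling -((-a)//b),
-- which equals the float computation on all of Dom (|n| ≤ 2^31 < 2^53); the `if … then []` guard only
-- totalises the two divisions (Python raises ZeroDivisionError there, outside Pre_).
def slice_rect2 (rect_size : Int × Int) (tile_size : Int × Int) (tile_step : Int × Int) : List (Int × Int × Int × Int) :=
  let x_size := rect_size.1
  let y_size := rect_size.2
  let x_step := tile_step.1
  let y_step := tile_step.2
  if x_step = 0 ∨ y_step = 0 then [] else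
  let cols : Int := -(PySem.Int.floordiv (-x_size) x_step)
  let rows : Int := -(PySem.Int.floordiv (-y_size) y_step)
  let rects := (PySem.List.pyRange 0 rows 1).flatMap (fun i =>
      (PySem.List.pyRange 0 cols 1).map (fun j =>
        ((j - 1) * x_step + tile_size.1, (i - 1) * y_step + tile_size.2, tile_size.1, tile_size.2)))
  let rects := if cols ≠ PySem.Int.floordiv x_size x_step then
      (PySem.List.pyRange 0 rows 1).foldl (fun rects i =>
        pvModAt rects (i * cols + cols - 1) (fun r => (r.1, r.2.1, x_size - r.1, r.2.2.2))) rects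
    else rects
  let rects := if rows ≠ PySem.Int.floordiv y_size y_step then
      (PySem.List.pyRange 0 cols 1).foldl (fun rects j =>
        pvModAt rects ((rows - 1) * cols + j) (fun r => (r.1, r.2.1, r.2.2.1, y_size - r.2.1))) rects
    else rects
  rects

-- ===== PORT B =====
-- literal port of Source B: clip flags first, a column template (x-offset, width) built once, then one
-- row loop extending with the template (same ceiling/guard remarks as in A).
def slice_rect2_alt (rect_size : Int × Int) (tile_size : Int × Int) (tile_step : Int × Int) : List (Int × Int × Int × Int) :=
  let x_size := rect_size.1
  let y_size := rect_size.2
  let x_step := tile_step.1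
  let y_step := tile_step.2
  if x_step = 0 ∨ y_step = 0 then [] else
  let cols : Int := -(PySem.Int.floordiv (-x_size) x_step)
  let rows : Int := -(PySem.Int.floordiv (-y_size) y_step)
  let clip_x : Bool := decide (cols ≠ PySem.Int.floordiv x_size x_step)
  let clip_y : Bool := decide (rows ≠ PySem.Int.floordiv y_size y_step)
  let xs := (PySem.List.pyRange 0 cols 1).foldl (fun xs j =>
    let x0 := (j - 1) * x_step + tile_size.1
    let w := if clip_x ∧ j = cols - 1 then x_size - x0 else tile_size.1
    xs ++ [(x0, w)]) ([] : List (Int × Int))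
  (PySem.List.pyRange 0 rows 1).foldl (fun rects i =>
    let y0 := (i - 1) * y_step + tile_size.2
    let h := if clip_y ∧ i = rows - 1 then y_size - y0 else tile_size.2
    rects ++ xs.map (fun p => (p.1, y0, p.2, h))) []

-- ===== PRECONDITION & SPEC =====
-- Pre_ excludes exactly the inputs where A raises: a zero step component (ZeroDivisionError), and the
-- degenerate grids where one tile count is ≤ 0, the other is > 0 and the corresponding clip pass runs,
-- so A indexes into an empty tile list (IndexError).
def Pre_slice_rect2 (rect_size : Int × Int) (tile_size : Int × Int) (tile_step : Int × Int) : Prop :=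
  tile_step.1 ≠ 0 ∧ tile_step.2 ≠ 0 ∧
  ¬ (-(PySem.Int.floordiv (-rect_size.1) tile_step.1) ≤ 0 ∧
     0 < -(PySem.Int.floordiv (-rect_size.2) tile_step.2) ∧
     -(PySem.Int.floordiv (-rect_size.1) tile_step.1) ≠ PySem.Int.floordiv rect_size.1 tile_step.1) ∧
  ¬ (-(PySem.Int.floordiv (-rect_size.2) tile_step.2) ≤ 0 ∧
     0 < -(PySem.Int.floordiv (-rect_size.1) tile_step.1) ∧
     -(PySem.Int.floordiv (-rect_size.2) tile_step.2) ≠ PySem.Int.floordiv rect_size.2 tile_step.2)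
instance (rect_size : Int × Int) (tile_size : Int × Int) (tile_step : Int × Int) : Decidable (Pre_slice_rect2 rect_size tile_size tile_step) := by unfold Pre_slice_rect2; infer_instance
def pvWitness_slice_rect2 : (Int × Int) × (Int × Int) × (Int × Int) := ((5, 7), (2, 3), (2, 3))

def Spec_slice_rect2 (rect_size : Int × Int) (tile_size : Int × Int) (tile_step : Int × Int) (out : List (Int × Int × Int × Int)) : Prop := out = slice_rect2_alt rect_size tile_size tile_step
instance (rect_size : Int × Int) (tile_size : Int × Int) (tile_step : Int × Int) (out : List (Int × Int × Int × Int)) : Decidable (Spec_slice_rect2 rect_size tile_size tile_step out) := by unfold Spec_slice_rect2; infer_instance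

-- ===== CLAIM (what is proved, stated in full; the proofs are below) =====
def Claim_equal_slice_rect2 : Prop := ∀ (rect_size : Int × Int) (tile_size : Int × Int) (tile_step : Int × Int), Dom_slice_rect2 rect_size tile_size tile_step → Pre_slice_rect2 rect_size tile_size tile_step → Spec_slice_rect2 rect_size tile_size tile_step (slice_rect2 rect_size tile_size tile_step)
-- ===== LEMMAS AND PROOFS =====

theorem pvModAt_pos {α : Type} {l : List α} {i : Int} {t : α} (g : α → α)
    (h : PySem.List.pyGet? l i = some t) :
    pvModAt l i g = PySem.List.pySetD l i (g t) := by
  unfold pvModAt; rw [h]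

theorem length_pvModAt {α : Type} (l : List α) (i : Int) (g : α → α) :
    (pvModAt l i g).length = l.length := by
  unfold pvModAt
  cases h : PySem.List.pyGet? l i with
  | none => rfl
  | some t => simp [PySem.List.length_pySetD]

theorem pvModAt_nil {α : Type} (i : Int) (g : α → α) : pvModAt ([] : List α) i g = [] := by
  unfold pvModAt
  cases h : PySem.List.pyGet? ([] : List α) i with
  | none => rfl
  | some t =>
    have : t ∈ ([] : List α) := PySem.List.mem_of_pyGet?_eq_some (h := h)
    simp at this

theorem foldl_pvModAt_nil {α : Type} (l : List Int) (idx : Int → Int) (g : α → α) :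
    l.foldl (fun acc j => pvModAt acc (idx j) g) ([] : List α) = [] := by
  induction l with
  | nil => rfl
  | cons a t ih => simpa [pvModAt_nil] using ih

theorem pvModAt_append_right {α : Type} (X Y : List α) (k : Nat) (g : α → α) :
    pvModAt (X ++ Y) ((X.length : Int) + (k : Int)) g = X ++ pvModAt Y (k : Int) g := by
  have hc : (X.length : Int) + (k : Int) = ((X.length + k : Nat) : Int) := by push_cast; ring
  unfold pvModAt
  rw [PySem.List.pyGet?_append_right, PySem.List.pyGet?_natCast]
  cases h : Y[k]? with
  | none => rfl
  | some t =>
    have hk : k < Y.length := by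
      by_contra hk
      simp [List.getElem?_eq_none (by omega : Y.length ≤ k)] at h
    simp only [hc, PySem.List.pySetD_natCast]
    rw [List.set_append_right _ _ (by omega)]
    simp

theorem pvModAt_append_left {α : Type} (X Y : List α) (k : Nat) (hk : k < X.length) (g : α → α) :
    pvModAt (X ++ Y) (k : Int) g = pvModAt X (k : Int) g ++ Y := by
  unfold pvModAt
  rw [PySem.List.pyGet?_natCast, PySem.List.pyGet?_natCast, List.getElem?_append_left hk]
  cases h : X[k]? with
  | none => simp [List.getElem?_eq_getElem hk] at h
  | some t =>
    simp only [PySem.List.pySetD_natCast]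
    rw [List.set_append_left _ _ hk]

theorem pvModAt_map_range {α : Type} (c k : Nat) (hk : k < c) (f : Nat → α) (g : α → α) :
    pvModAt ((List.range c).map f) (k : Int) g
      = (List.range c).map (fun j => if j = k then g (f k) else f j) := by
  have hget : PySem.List.pyGet? ((List.range c).map f) (k : Int) = some (f k) := by
    rw [PySem.List.pyGet?_natCast]
    simp [hk]
  rw [pvModAt_pos g hget, PySem.List.pySetD_natCast]
  apply List.ext_getElem
  · simp
  · intro n h1 h2
    simp only [List.getElem_set, List.getElem_map, List.getElem_range]
    by_cases hn : n = k <;> simp [hn, Ne.symm]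

theorem flatMap_congr_mem {α β : Type} {l : List α} {f g : α → List β}
    (h : ∀ x ∈ l, f x = g x) : l.flatMap f = l.flatMap g := by
  induction l with
  | nil => rfl
  | cons a t ih =>
    simp only [List.flatMap_cons, h a (by simp)]
    rw [ih (fun x hx => h x (by simp [hx]))]

-- A's first clip pass: patching the (c-1)-st entry of each c-long row block
theorem patch_rows {α : Type} (c : Nat) (hc : 0 < c) (g : α → α) :
    ∀ (r : Nat) (row : Nat → List α) (Y : List α), (∀ i, (row i).length = c) →
    (List.range r).foldl (fun acc (i : Nat) => pvModAt acc ((i : Int) * (c : Int) + (c : Int) - 1) g)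
        ((List.range r).flatMap row ++ Y)
      = (List.range r).flatMap (fun i => pvModAt (row i) (((c - 1 : Nat) : Int)) g) ++ Y := by
  intro r
  induction r with
  | zero => intro row Y _; simp
  | succ r ih =>
    intro row Y hlen
    rw [List.range_succ, List.foldl_append, List.flatMap_append, List.append_assoc,
      ih row _ hlen, List.flatMap_append]
    simp only [List.foldl_cons, List.foldl_nil, List.flatMap_singleton]
    have hP : ((List.range r).flatMap (fun i => pvModAt (row i) (((c - 1 : Nat) : Int)) g)).length = r * c := by
      simp [List.length_flatMap, length_pvModAt, hlen]
    have hidx : (r : Int) * (c : Int) + (c : Int) - 1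
        = (((List.range r).flatMap (fun i => pvModAt (row i) (((c - 1 : Nat) : Int)) g)).length : Int) + ((c - 1 : Nat) : Int) := by
      rw [hP]; push_cast [Nat.cast_sub hc]; ring
    rw [hidx, pvModAt_append_right, pvModAt_append_left _ _ _ (by rw [hlen]; omega),
      List.append_assoc]

-- A's second clip pass over the trailing row block: maps g over the whole block
theorem patch_last_row {α : Type} (g : α → α) :
    ∀ (n : Nat) (X Y : List α), Y.length = n →
    (List.range n).foldl (fun acc (j : Nat) => pvModAt acc ((X.length : Int) + (j : Int)) g) (X ++ Y)
      = X ++ Y.map g := by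
  intro n
  induction n with
  | zero => intro X Y h; rw [List.eq_nil_of_length_eq_zero h]; simp
  | succ n ih =>
    intro X Y h
    cases Y with
    | nil => simp at h
    | cons y Y' =>
      rw [List.range_succ_eq_map, List.foldl_cons, List.foldl_map]
      have h0 : pvModAt (X ++ y :: Y') ((X.length : Int) + ((0 : Nat) : Int)) g
          = (X ++ [g y]) ++ Y' := by
        rw [pvModAt_append_right]
        have hm : pvModAt (y :: Y') (((0 : Nat)) : Int) g = g y :: Y' := by
          rw [pvModAt_pos (t := y) g (by rw [PySem.List.pyGet?_natCast]; rfl),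
            PySem.List.pySetD_natCast]
          rfl
        rw [hm, List.append_assoc]; rfl
      rw [h0]
      have hstep : (List.range n).foldl
            (fun acc (j : Nat) => pvModAt acc ((X.length : Int) + ((j.succ : Nat) : Int)) g)
            ((X ++ [g y]) ++ Y')
          = (List.range n).foldl
            (fun acc (j : Nat) => pvModAt acc (((X ++ [g y]).length : Int) + (j : Int)) g)
            ((X ++ [g y]) ++ Y') :=
        by
        apply PySem.List.foldl_congr_mem
        intro acc j _
        · congr 1
          simp only [List.length_append, List.length_cons, List.length_nil]
          push_cast
          ring
      rw [hstep, ih (X ++ [g y]) Y' (by simpa using h)]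
      simp

-- ===== VERDICT (by name: the statement is the Claim_ definition above) =====
theorem slice_rect2_spec : Claim_equal_slice_rect2 := by
  intro rs ts st _ hP
  obtain ⟨hx0, hy0, hpx, hpy⟩ := hP
  unfold Spec_slice_rect2 slice_rect2 slice_rect2_alt
  simp only [if_neg (show ¬ (st.1 = 0 ∨ st.2 = 0) by tauto)]
  set C : Int := -(PySem.Int.floordiv (-rs.1) st.1) with hCdef
  set R : Int := -(PySem.Int.floordiv (-rs.2) st.2) with hRdef
  by_cases hR : R ≤ 0
  · -- no rows: both sides are []
    rw [PySem.List.pyRange_one_eq_nil hR]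
    simp [foldl_pvModAt_nil, ite_self]
  · by_cases hC : C ≤ 0
    · -- no columns (and by Pre_ the x-clip pass cannot fire): both sides are []
      have hnoclip : ¬ (C ≠ PySem.Int.floordiv rs.1 st.1) := by
        intro hne
        exact hpx ⟨hC, by omega, hne⟩
      rw [PySem.List.pyRange_one_eq_nil hC]
      simp [hnoclip, ite_self]
    · obtain ⟨c, hc⟩ : ∃ c : Nat, C = (c : Int) := ⟨C.toNat, by omega⟩
      obtain ⟨r, hr⟩ : ∃ r : Nat, R = (r : Int) := ⟨R.toNat, by omega⟩
      have hc0 : 0 < c := by omega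
      have hr0 : 0 < r := by omega
      rw [hc, hr]
      rw [PySem.List.pyRange_zero_nat, PySem.List.pyRange_zero_nat]
      simp only [List.flatMap_map, List.map_map, List.foldl_map,
        decide_eq_true_eq, PySem.List.foldl_append_singleton_eq_map,
        PySem.List.foldl_append_eq_flatMap, List.nil_append, Function.comp_def]
      by_cases hdx : (c : Int) ≠ PySem.Int.floordiv rs.1 st.1 <;>
        by_cases hdy : (r : Int) ≠ PySem.Int.floordiv rs.2 st.2
      · rw [if_pos hdy, if_pos hdx]
        have h1 := patch_rows c hc0 (fun t : Int × Int × Int × Int => (t.1, t.2.1, rs.1 - t.1, t.2.2.2)) r (fun a : Nat => (List.range c).map (fun j : Nat => ((((j : Int)) - 1) * st.1 + ts.1, ((a : Int) - 1) * st.2 + ts.2, ts.1, ts.2))) [] (fun i => by simp)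
        simp only [List.append_nil] at h1
        rw [h1]
        have h2 : (List.range r).flatMap (fun a => pvModAt ((fun a : Nat => (List.range c).map (fun j : Nat => ((((j : Int)) - 1) * st.1 + ts.1, ((a : Int) - 1) * st.2 + ts.2, ts.1, ts.2))) a) (((c - 1 : Nat) : Int)) (fun t : Int × Int × Int × Int => (t.1, t.2.1, rs.1 - t.1, t.2.2.2)))
            = (List.range r).flatMap (fun a : Nat => (List.range c).map (fun j : Nat => if j = c - 1 then (fun t : Int × Int × Int × Int => (t.1, t.2.1, rs.1 - t.1, t.2.2.2)) (((((c - 1 : Nat)) : Int) - 1) * st.1 + ts.1, ((a : Int) - 1) * st.2 + ts.2, ts.1, ts.2) else ((((j : Int)) - 1) * st.1 + ts.1, ((a : Int) - 1) * st.2 + ts.2, ts.1, ts.2))) :=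
          flatMap_congr_mem (fun a _ => pvModAt_map_range c (c - 1) (by omega) _ _)
        rw [h2]
        obtain ⟨r', rfl⟩ : ∃ r', r = r' + 1 := ⟨r - 1, by omega⟩
        rw [List.range_succ, List.flatMap_append, List.flatMap_singleton]
        have hXlen : ((List.range r').flatMap (fun a : Nat => (List.range c).map (fun j : Nat => if j = c - 1 then (fun t : Int × Int × Int × Int => (t.1, t.2.1, rs.1 - t.1, t.2.2.2)) (((((c - 1 : Nat)) : Int) - 1) * st.1 + ts.1, ((a : Int) - 1) * st.2 + ts.2, ts.1, ts.2) else ((((j : Int)) - 1) * st.1 + ts.1, ((a : Int) - 1) * st.2 + ts.2, ts.1, ts.2)))).length = r' * c := by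
          simp [List.length_flatMap]
        have hcongr := PySem.List.foldl_congr_mem
          (l := List.range c)
          (init := (List.range r').flatMap (fun a : Nat => (List.range c).map (fun j : Nat => if j = c - 1 then (fun t : Int × Int × Int × Int => (t.1, t.2.1, rs.1 - t.1, t.2.2.2)) (((((c - 1 : Nat)) : Int) - 1) * st.1 + ts.1, ((a : Int) - 1) * st.2 + ts.2, ts.1, ts.2) else ((((j : Int)) - 1) * st.1 + ts.1, ((a : Int) - 1) * st.2 + ts.2, ts.1, ts.2))) ++ (fun a : Nat => (List.range c).map (fun j : Nat => if j = c - 1 then (fun t : Int × Int × Int × Int => (t.1, t.2.1, rs.1 - t.1, t.2.2.2)) (((((c - 1 : Nat)) : Int) - 1) * st.1 + ts.1, ((a : Int) - 1) * st.2 + ts.2, ts.1, ts.2) else ((((j : Int)) - 1) * st.1 + ts.1, ((a : Int) - 1) * st.2 + ts.2, ts.1, ts.2))) r')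
          (f := fun acc (j : Nat) => pvModAt acc ((((r' + 1 : Nat) : Int) - 1) * (c : Int) + (j : Int)) (fun t : Int × Int × Int × Int => (t.1, t.2.1, t.2.2.1, rs.2 - t.2.1)))
          (g := fun acc (j : Nat) => pvModAt acc ((((List.range r').flatMap (fun a : Nat => (List.range c).map (fun j : Nat => if j = c - 1 then (fun t : Int × Int × Int × Int => (t.1, t.2.1, rs.1 - t.1, t.2.2.2)) (((((c - 1 : Nat)) : Int) - 1) * st.1 + ts.1, ((a : Int) - 1) * st.2 + ts.2, ts.1, ts.2) else ((((j : Int)) - 1) * st.1 + ts.1, ((a : Int) - 1) * st.2 + ts.2, ts.1, ts.2)))).length : Int) + (j : Int)) (fun t : Int × Int × Int × Int => (t.1, t.2.1, t.2.2.1, rs.2 - t.2.1)))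
          (by intro acc j _; rw [hXlen]; push_cast; congr 2; ring)
        rw [hcongr, patch_last_row (fun t : Int × Int × Int × Int => (t.1, t.2.1, t.2.2.1, rs.2 - t.2.1)) c _ _ (by simp)]
        rw [List.flatMap_append, List.flatMap_singleton]
        congr 1
        · apply flatMap_congr_mem
          intro a ha
          rw [List.mem_range] at ha
          apply List.map_congr_left
          intro j hj
          rw [List.mem_range] at hj
          have hA : a ≠ r' := by omega
          have hcast : ((c - 1 : Nat) : Int) = (c : Int) - 1 := by omega
          by_cases hj' : j = c - 1
          · have hB : ((j : Int)) = (c : Int) - 1 := by omega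
            simp [hj', hdx, hA, hcast]
          · have hB : ((j : Int)) ≠ (c : Int) - 1 := by omega
            simp [hj', hB, hA]
        · rw [List.map_map]
          apply List.map_congr_left
          intro j hj
          rw [List.mem_range] at hj
          have hcast : ((c - 1 : Nat) : Int) = (c : Int) - 1 := by omega
          have hdy' : ((r' : Int)) + 1 ≠ PySem.Int.floordiv rs.2 st.2 := by push_cast at hdy; exact hdy
          by_cases hj' : j = c - 1
          · have hB : ((j : Int)) = (c : Int) - 1 := by omega
            simp [Function.comp, hj', hdx, hdy', hcast]
          · have hB : ((j : Int)) ≠ (c : Int) - 1 := by omega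
            simp [Function.comp, hj', hB, hdy']
      · rw [if_neg hdy, if_pos hdx]
        have h1 := patch_rows c hc0 (fun t : Int × Int × Int × Int => (t.1, t.2.1, rs.1 - t.1, t.2.2.2)) r (fun a : Nat => (List.range c).map (fun j : Nat => ((((j : Int)) - 1) * st.1 + ts.1, ((a : Int) - 1) * st.2 + ts.2, ts.1, ts.2))) [] (fun i => by simp)
        simp only [List.append_nil] at h1
        rw [h1]
        have h2 : (List.range r).flatMap (fun a => pvModAt ((fun a : Nat => (List.range c).map (fun j : Nat => ((((j : Int)) - 1) * st.1 + ts.1, ((a : Int) - 1) * st.2 + ts.2, ts.1, ts.2))) a) (((c - 1 : Nat) : Int)) (fun t : Int × Int × Int × Int => (t.1, t.2.1, rs.1 - t.1, t.2.2.2)))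
            = (List.range r).flatMap (fun a : Nat => (List.range c).map (fun j : Nat => if j = c - 1 then (fun t : Int × Int × Int × Int => (t.1, t.2.1, rs.1 - t.1, t.2.2.2)) (((((c - 1 : Nat)) : Int) - 1) * st.1 + ts.1, ((a : Int) - 1) * st.2 + ts.2, ts.1, ts.2) else ((((j : Int)) - 1) * st.1 + ts.1, ((a : Int) - 1) * st.2 + ts.2, ts.1, ts.2))) :=
          flatMap_congr_mem (fun a _ => pvModAt_map_range c (c - 1) (by omega) _ _)
        rw [h2]
        apply flatMap_congr_mem
        intro a ha
        apply List.map_congr_left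
        intro j hj
        rw [List.mem_range] at hj
        have hcast : ((c - 1 : Nat) : Int) = (c : Int) - 1 := by omega
        by_cases hj' : j = c - 1
        · have hB : ((j : Int)) = (c : Int) - 1 := by omega
          simp [hj', hdx, hdy, hcast]
        · have hB : ((j : Int)) ≠ (c : Int) - 1 := by omega
          simp [hj', hdy, hB]
      · rw [if_pos hdy, if_neg hdx]
        obtain ⟨r', rfl⟩ : ∃ r', r = r' + 1 := ⟨r - 1, by omega⟩
        rw [List.range_succ, List.flatMap_append, List.flatMap_singleton]
        have hXlen : ((List.range r').flatMap (fun a : Nat => (List.range c).map (fun j : Nat => ((((j : Int)) - 1) * st.1 + ts.1, ((a : Int) - 1) * st.2 + ts.2, ts.1, ts.2)))).length = r' * c := by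
          simp [List.length_flatMap]
        have hcongr := PySem.List.foldl_congr_mem
          (l := List.range c)
          (init := (List.range r').flatMap (fun a : Nat => (List.range c).map (fun j : Nat => ((((j : Int)) - 1) * st.1 + ts.1, ((a : Int) - 1) * st.2 + ts.2, ts.1, ts.2))) ++ (fun a : Nat => (List.range c).map (fun j : Nat => ((((j : Int)) - 1) * st.1 + ts.1, ((a : Int) - 1) * st.2 + ts.2, ts.1, ts.2))) r')
          (f := fun acc (j : Nat) => pvModAt acc ((((r' + 1 : Nat) : Int) - 1) * (c : Int) + (j : Int)) (fun t : Int × Int × Int × Int => (t.1, t.2.1, t.2.2.1, rs.2 - t.2.1)))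
          (g := fun acc (j : Nat) => pvModAt acc ((((List.range r').flatMap (fun a : Nat => (List.range c).map (fun j : Nat => ((((j : Int)) - 1) * st.1 + ts.1, ((a : Int) - 1) * st.2 + ts.2, ts.1, ts.2)))).length : Int) + (j : Int)) (fun t : Int × Int × Int × Int => (t.1, t.2.1, t.2.2.1, rs.2 - t.2.1)))
          (by intro acc j _; rw [hXlen]; push_cast; congr 2; ring)
        rw [hcongr, patch_last_row (fun t : Int × Int × Int × Int => (t.1, t.2.1, t.2.2.1, rs.2 - t.2.1)) c _ _ (by simp)]
        rw [List.flatMap_append, List.flatMap_singleton]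
        congr 1
        · apply flatMap_congr_mem
          intro a ha
          rw [List.mem_range] at ha
          apply List.map_congr_left
          intro j hj
          have hA : a ≠ r' := by omega
          simp [hdx, hA]
        · rw [List.map_map]
          apply List.map_congr_left
          intro j hj
          have hdy' : ((r' : Int)) + 1 ≠ PySem.Int.floordiv rs.2 st.2 := by push_cast at hdy; exact hdy
          simp [Function.comp, hdx, hdy']
      · rw [if_neg hdy, if_neg hdx]
        apply flatMap_congr_mem
        intro a ha
        apply List.map_congr_left
        intro j hj
        simp [hdx, hdy]
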